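-- pv_equiv track=rewrite | github.com/ensk26/algorithm-study | programmers/1108_1.py | solution
-- ===== SOURCE A (Python) =====
-- def solution(n, s):
--     answer = []
--     if n > s:
--         return [-1]
--     for i in range(n, 1, -1):
--         answer.append(s // i)
--         s -= s // i
--
--     answer.append(s)
--     return answer
-- ===== SOURCE B (Python) =====
-- def solution(n, s):
--     if n > s:
--         return [-1]
--     if n <= 1:
--         return [s]
--     q, r = divmod(s, n)
--     return [q] * (n - r) + [q + 1] * r
-- ===== Notes on version B (the rewrite author's own statement) =====
-- stated objective: simpler
-- what changed: Replaces the iterative floor-peeling loop (append s//i, subtract, for i = n..2) with the closed form q,r = divmod(s,n); [q]*(n-r)+[q+1]*r, with the degenerate n <= 1 case returning [s] directly.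
import Mathlib
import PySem

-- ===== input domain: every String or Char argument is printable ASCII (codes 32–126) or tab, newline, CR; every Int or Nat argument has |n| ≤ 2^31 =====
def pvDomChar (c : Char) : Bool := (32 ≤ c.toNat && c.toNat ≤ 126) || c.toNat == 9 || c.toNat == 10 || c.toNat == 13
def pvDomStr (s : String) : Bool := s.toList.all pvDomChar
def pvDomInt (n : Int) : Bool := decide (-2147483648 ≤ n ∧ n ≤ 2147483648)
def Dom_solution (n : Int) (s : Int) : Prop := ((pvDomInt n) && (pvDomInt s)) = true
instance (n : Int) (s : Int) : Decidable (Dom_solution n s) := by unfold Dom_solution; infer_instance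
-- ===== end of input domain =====

-- B replaces A's floor-peeling loop by the closed form [q]*(n-r)+[q+1]*r (q,r = divmod(s,n)); objective: simpler.

-- ===== PORT A =====
-- loop body of A: answer.append(s // i); s -= s // i
def solutionStep (p : List Int × Int) (i : Int) : List Int × Int :=
  (p.1 ++ [PySem.Int.floordiv p.2 i], p.2 - PySem.Int.floordiv p.2 i)

def solution (n : Int) (s : Int) : List Int :=
  if n > s then [-1]
  else
    let st := (PySem.List.pyRange n 1 (-1)).foldl solutionStep ([], s)
    st.1 ++ [st.2]

-- ===== PORT B =====
def solution_alt (n : Int) (s : Int) : List Int :=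
  if n > s then [-1]
  else if n ≤ 1 then [s]
  else
    let q := PySem.Int.floordiv s n
    let r := PySem.Int.mod s n
    List.replicate (n - r).toNat q ++ List.replicate r.toNat (q + 1)

-- ===== PRECONDITION & SPEC =====
def Spec_solution (n : Int) (s : Int) (out : List Int) : Prop := out = solution_alt n s
instance (n : Int) (s : Int) (out : List Int) : Decidable (Spec_solution n s out) := by unfold Spec_solution; infer_instance

-- ===== CLAIM (what is proved, stated in full; the proofs are below) =====
def Claim_equal_solution : Prop := ∀ (n : Int) (s : Int), Dom_solution n s → Spec_solution n s (solution n s)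

-- ===== LEMMAS AND PROOFS =====

-- the whole of A's non-guard branch
def runA (n s : Int) : List Int :=
  let st := (PySem.List.pyRange n 1 (-1)).foldl solutionStep ([], s)
  st.1 ++ [st.2]

-- B's closed form for 2 ≤ n
def distB (n s : Int) : List Int :=
  List.replicate (n - PySem.Int.mod s n).toNat (PySem.Int.floordiv s n) ++
  List.replicate (PySem.Int.mod s n).toNat (PySem.Int.floordiv s n + 1)

theorem foldl_step_acc (l : List Int) (acc : List Int) (s : Int) :
    l.foldl solutionStep (acc, s)
      = (acc ++ (l.foldl solutionStep ([], s)).1, (l.foldl solutionStep ([], s)).2) := by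
  induction l generalizing acc s with
  | nil => simp
  | cons i l ih =>
      simp only [List.foldl_cons, solutionStep, List.nil_append]
      rw [ih, ih [PySem.Int.floordiv s i]]
      simp

theorem runA_cons (n s : Int) (h : 2 ≤ n) :
    runA n s = PySem.Int.floordiv s n :: runA (n - 1) (s - PySem.Int.floordiv s n) := by
  unfold runA
  rw [PySem.List.pyRange_neg_one_cons (by omega : (1:Int) < n)]
  simp only [List.foldl_cons, solutionStep]
  rw [foldl_step_acc]
  simp

-- arithmetic recurrence: distB n s = q :: distB (n-1) (s - q)
theorem distB_rec (n s : Int) (h2 : 2 ≤ n) :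
    distB n s = PySem.Int.floordiv s n :: distB (n - 1) (s - PySem.Int.floordiv s n) := by
  set q := PySem.Int.floordiv s n with hq
  set r := PySem.Int.mod s n with hr
  have hqr : q * n + r = s := PySem.Int.floordiv_mul_add_mod s n
  have hr0 : 0 ≤ r := PySem.Int.mod_nonneg s (by omega)
  have hrn : r < n := PySem.Int.mod_lt s (by omega)
  by_cases hcase : r < n - 1
  · have hq' : PySem.Int.floordiv (s - q) (n - 1) = q := by
      rw [PySem.Int.floordiv_eq_iff_of_pos (show (0:Int) < n - 1 by omega)]
      constructor <;> nlinarith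
    have hm' : PySem.Int.mod (s - q) (n - 1) = r := by
      have := PySem.Int.floordiv_mul_add_mod (s - q) (n - 1)
      rw [hq'] at this; nlinarith
    unfold distB
    rw [hq', hm', ← hq, ← hr]
    have h1 : (n - r).toNat = (n - 1 - r).toNat + 1 := by omega
    rw [h1, List.replicate_succ]
    simp
  · have hreq : r = n - 1 := by omega
    have hq' : PySem.Int.floordiv (s - q) (n - 1) = q + 1 := by
      rw [PySem.Int.floordiv_eq_iff_of_pos (show (0:Int) < n - 1 by omega)]
      constructor <;> nlinarith
    have hm' : PySem.Int.mod (s - q) (n - 1) = 0 := by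
      have := PySem.Int.floordiv_mul_add_mod (s - q) (n - 1)
      rw [hq'] at this; nlinarith
    unfold distB
    rw [hq', hm', ← hq, ← hr, hreq]
    have h1 : (n - (n - 1)).toNat = 1 := by omega
    have h2' : (n - 1 - 0).toNat = (n - 1).toNat := by omega
    rw [h1, h2']
    simp [List.replicate_succ]

theorem base_two (s : Int) : runA 2 s = distB 2 s := by
  have hq := PySem.Int.floordiv_mul_add_mod s 2
  have hr0 : 0 ≤ PySem.Int.mod s 2 := PySem.Int.mod_nonneg s (by omega)
  have hrn : PySem.Int.mod s 2 < 2 := PySem.Int.mod_lt s (by omega)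
  unfold runA distB
  rw [PySem.List.pyRange_neg_one_cons (by omega : (1:Int) < 2),
      show (2:Int) - 1 = 1 from rfl,
      PySem.List.pyRange_neg_one_eq_nil (by omega : (1:Int) ≤ 1)]
  simp only [List.foldl_cons, List.foldl_nil, solutionStep]
  set q := PySem.Int.floordiv s 2
  set r := PySem.Int.mod s 2
  interval_cases r
  · have h1 : (2 - (0:Int)).toNat = 2 := by omega
    have h2 : ((0:Int)).toNat = 0 := by omega
    rw [h1, h2]
    simp only [List.replicate, List.append_nil]
    have : s - q = q := by omega
    simp [this]
  · have h1 : (2 - (1:Int)).toNat = 1 := by omega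
    have h2 : ((1:Int)).toNat = 1 := by omega
    rw [h1, h2]
    simp only [List.replicate]
    have : s - q = q + 1 := by omega
    simp [this]

theorem main_loop (k : Nat) : ∀ s : Int, (k : Int) + 2 ≤ s → runA ((k : Int) + 2) s = distB ((k : Int) + 2) s := by
  induction k with
  | zero => intro s _; exact_mod_cast base_two s
  | succ k ih =>
      intro s hs
      have h2 : 2 ≤ (k : Int) + 3 := by omega
      have hn : ((k : Nat) + 1 : Nat) = ((k : Int) + 1).toNat := by omega
      have hcast : ((k + 1 : Nat) : Int) + 2 = (k : Int) + 3 := by push_cast; ring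
      rw [hcast] at hs ⊢
      set n := (k : Int) + 3 with hndef
      set q := PySem.Int.floordiv s n with hq
      have hqr : q * n + PySem.Int.mod s n = s := PySem.Int.floordiv_mul_add_mod s n
      have hr0 : 0 ≤ PySem.Int.mod s n := PySem.Int.mod_nonneg s (by omega)
      have hq1 : 1 ≤ q := by
        rw [hq, PySem.Int.le_floordiv_iff_mul_le (show (0:Int) < n by omega)]
        omega
      have hle : n - 1 ≤ s - q := by nlinarith
      rw [runA_cons n s h2, distB_rec n s h2]
      have : n - 1 = (k : Int) + 2 := by omega
      rw [this]
      exact congrArg _ (ih (s - q) (by omega))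

-- ===== VERDICT (by name: the statement is the Claim_ definition above) =====
theorem solution_spec : Claim_equal_solution := by
  intro n s _
  unfold Spec_solution solution solution_alt
  by_cases hgt : n > s
  · simp [hgt]
  · simp only [if_neg hgt]
    by_cases h1 : n ≤ 1
    · rw [if_pos h1, PySem.List.pyRange_neg_one_eq_nil (by omega : n ≤ 1)]
      simp
    · rw [if_neg h1]
      have h2 : 2 ≤ n := by omega
      have hk : n = ((n - 2).toNat : Int) + 2 := by omega
      have := main_loop (n - 2).toNat s (by omega)
      rw [← hk] at this
      exact this
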